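-- pv_equiv track=rewrite | github.com/tl265/SearchBarbara | app/run_manager.py | _spans_from_text
-- ===== SOURCE A (Python) =====
-- from typing import Any, Callable, Dict, List, Optional
--
-- def _spans_from_text(text: str) -> List[Dict[str, str]]:
--     chunks: List[str] = []
--     lines = [ln.strip() for ln in str(text or "").splitlines()]
--     buf: List[str] = []
--     cur_len = 0
--     for ln in lines:
--         if not ln:
--             if buf:
--                 chunks.append("\n".join(buf).strip())
--                 buf = []
--                 cur_len = 0
--             continue
--         if cur_len + len(ln) + 1 > 900 and buf:
--             chunks.append("\n".join(buf).strip())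
--             buf = [ln]
--             cur_len = len(ln)
--         else:
--             buf.append(ln)
--             cur_len += len(ln) + 1
--     if buf:
--         chunks.append("\n".join(buf).strip())
--     if not chunks:
--         chunks = [""]
--     spans: List[Dict[str, str]] = []
--     for i, c in enumerate(chunks, start=1):
--         spans.append({"span_id": f"S{i}", "text": c})
--     return spans
-- ===== SOURCE B (Python) =====
-- from typing import Dict, List
--
--
-- def _spans_from_text(text: str) -> List[Dict[str, str]]:
--     lines = [ln.strip() for ln in str(text or "").splitlines()]
--     # Phase 1: split the stripped lines into paragraph blocks at blank lines.
--     blocks: List[List[str]] = []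
--     block: List[str] = []
--     for ln in lines:
--         if ln:
--             block.append(ln)
--         elif block:
--             blocks.append(block)
--             block = []
--     if block:
--         blocks.append(block)
--     # Phase 2: greedily pack each block's lines into ~900-char chunks.
--     chunks: List[str] = []
--     for b in blocks:
--         buf: List[str] = []
--         cur_len = 0
--         for ln in b:
--             if cur_len + len(ln) + 1 > 900 and buf:
--                 chunks.append("\n".join(buf).strip())
--                 buf = [ln]
--                 cur_len = len(ln)
--             else:
--                 buf.append(ln)
--                 cur_len += len(ln) + 1
--         chunks.append("\n".join(buf).strip())
--     if not chunks:
--         chunks = [""]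
--     return [{"span_id": f"S{i}", "text": c} for i, c in enumerate(chunks, start=1)]
-- ===== Notes on version B (the rewrite author's own statement) =====
-- stated objective: alternative
-- what changed: Replaces A's single fused pass (blank lines inline-flush the packing buffer) by two passes: first split the stripped lines into paragraph blocks at blank lines, then greedily pack each block separately and concatenate; span dicts are built by a comprehension instead of an append loop.
import Mathlib
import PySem

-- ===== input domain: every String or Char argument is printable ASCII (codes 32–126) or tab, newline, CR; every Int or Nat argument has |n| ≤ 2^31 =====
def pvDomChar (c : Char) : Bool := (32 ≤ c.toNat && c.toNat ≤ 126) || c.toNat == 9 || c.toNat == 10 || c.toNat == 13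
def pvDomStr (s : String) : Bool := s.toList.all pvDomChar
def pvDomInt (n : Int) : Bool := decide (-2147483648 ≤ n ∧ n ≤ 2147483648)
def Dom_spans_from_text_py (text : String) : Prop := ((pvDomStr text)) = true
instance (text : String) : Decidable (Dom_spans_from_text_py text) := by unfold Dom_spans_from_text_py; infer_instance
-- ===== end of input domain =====

-- B restructures A's single fused pass into two passes (split into paragraph blocks, then pack each block); same return value, objective: alternative decomposition.

-- ===== PORT A =====
-- "\n".join(buf).strip()  (appears literally in both Pythons)
def pvFlush (buf : List String) : String := PySem.Str.strip (PySem.Str.join "\n" buf)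

-- A's loop body over state (chunks, buf, cur_len)
def pvStepA (st : List String × List String × Int) (ln : String) : List String × List String × Int :=
  if ln = "" then
    (if st.2.1 ≠ [] then (st.1 ++ [pvFlush st.2.1], [], 0) else st)
  else if st.2.2 + PySem.Str.len ln + 1 > 900 ∧ st.2.1 ≠ [] then
    (st.1 ++ [pvFlush st.2.1], [ln], PySem.Str.len ln)
  else
    (st.1, st.2.1 ++ [ln], st.2.2 + PySem.Str.len ln + 1)

def spans_from_text_py (text : String) : List (List (String × String)) :=
  let t := if text = "" then "" else text
  let lines := (PySem.Str.splitlines t).map PySem.Str.strip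
  let st := lines.foldl pvStepA ([], [], 0)
  let chunks := if st.2.1 ≠ [] then st.1 ++ [pvFlush st.2.1] else st.1
  let chunks := if chunks = [] then [""] else chunks
  (PySem.List.enumerate chunks 1).foldl
    (fun spans ic => spans ++ [[("span_id", "S" ++ PySem.Int.toStr ic.1), ("text", ic.2)]]) []

-- ===== PORT B =====
-- B phase 1 loop body over state (blocks, block)
def pvBlockStep (st : List (List String) × List String) (ln : String) : List (List String) × List String :=
  if ln ≠ "" then (st.1, st.2 ++ [ln])
  else if st.2 ≠ [] then (st.1 ++ [st.2], [])
  else st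

-- B phase 2 inner loop body over state (chunks-of-this-block, buf, cur_len)
def pvPackStep (st : List String × List String × Int) (ln : String) : List String × List String × Int :=
  if st.2.2 + PySem.Str.len ln + 1 > 900 ∧ st.2.1 ≠ [] then
    (st.1 ++ [pvFlush st.2.1], [ln], PySem.Str.len ln)
  else
    (st.1, st.2.1 ++ [ln], st.2.2 + PySem.Str.len ln + 1)

def pvPackBlock (b : List String) : List String :=
  let st := b.foldl pvPackStep ([], [], 0)
  st.1 ++ [pvFlush st.2.1]

def spans_from_text_py_alt (text : String) : List (List (String × String)) :=
  let lines := (PySem.Str.splitlines (if text = "" then "" else text)).map PySem.Str.strip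
  let bst := lines.foldl pvBlockStep ([], [])
  let blocks := if bst.2 ≠ [] then bst.1 ++ [bst.2] else bst.1
  let chunks := blocks.foldl (fun acc b => acc ++ pvPackBlock b) []
  let chunks := if chunks = [] then [""] else chunks
  (PySem.List.enumerate chunks 1).map
    (fun ic => [("span_id", "S" ++ PySem.Int.toStr ic.1), ("text", ic.2)])

-- ===== PRECONDITION & SPEC =====
def Spec_spans_from_text_py (text : String) (out : List (List (String × String))) : Prop := out = spans_from_text_py_alt text
instance (text : String) (out : List (List (String × String))) : Decidable (Spec_spans_from_text_py text out) := by unfold Spec_spans_from_text_py; infer_instance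

-- ===== CLAIM (what is proved, stated in full; the proofs are below) =====
def Claim_equal_spans_from_text_py : Prop := ∀ (text : String), Dom_spans_from_text_py text → Spec_spans_from_text_py text (spans_from_text_py text)

-- ===== LEMMAS AND PROOFS =====

-- the chunk list A produces, from an arbitrary loop state
def pvFinA (lines : List String) (st : List String × List String × Int) : List String :=
  let r := lines.foldl pvStepA st
  if r.2.1 ≠ [] then r.1 ++ [pvFlush r.2.1] else r.1

-- the chunk list B produces, from an arbitrary phase-1 state
def pvFinB (lines : List String) (st : List (List String) × List String) : List String :=
  let r := lines.foldl pvBlockStep st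
  let blocks := if r.2 ≠ [] then r.1 ++ [r.2] else r.1
  blocks.foldl (fun acc b => acc ++ pvPackBlock b) []

theorem pvBufNe (pb : List String) (st : List String × List String × Int) (h : pb ≠ []) :
    (pb.foldl pvPackStep st).2.1 ≠ [] := by
  induction pb generalizing st with
  | nil => exact absurd rfl h
  | cons q qs ih =>
    cases qs with
    | nil => simp only [List.foldl_cons, List.foldl_nil, pvPackStep]; split <;> simp
    | cons r rs => exact ih _ (by simp)

-- one A-step from a state whose chunk list carries an extra prefix X
theorem pvStepA_append (X cs buf : List String) (cur : Int) (ln : String) :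
    pvStepA (X ++ cs, buf, cur) ln = (X ++ (pvStepA (cs, buf, cur) ln).1, (pvStepA (cs, buf, cur) ln).2) := by
  unfold pvStepA
  dsimp only
  split_ifs <;> simp [List.append_assoc]

-- A's chunk accumulator factors out
theorem pvAccA (lines : List String) (X cs buf : List String) (cur : Int) :
    pvFinA lines (X ++ cs, buf, cur) = X ++ pvFinA lines (cs, buf, cur) := by
  induction lines generalizing cs buf cur with
  | nil =>
    simp only [pvFinA, List.foldl_nil]
    split <;> simp
  | cons ln rest ih =>
    simp only [pvFinA, List.foldl_cons] at ih ⊢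
    rw [pvStepA_append]
    exact ih (pvStepA (cs, buf, cur) ln).1 (pvStepA (cs, buf, cur) ln).2.1 (pvStepA (cs, buf, cur) ln).2.2

-- B's accumulated blocks factor out
theorem pvAccB (lines : List String) (bs : List (List String)) (pb : List String) :
    pvFinB lines (bs, pb) = (bs.map pvPackBlock).flatten ++ pvFinB lines ([], pb) := by
  induction lines generalizing bs pb with
  | nil =>
    by_cases hpb : pb = []
    · simp [pvFinB, hpb]
    · simp [pvFinB, hpb]
  | cons ln rest ih =>
    simp only [pvFinB, List.foldl_cons] at ih ⊢
    by_cases hln : ln = ""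
    · by_cases hpb : pb = []
      · have hX : pvBlockStep (bs, pb) ln = (bs, pb) := by simp [pvBlockStep, hln, hpb]
        have h0 : pvBlockStep (([] : List (List String)), pb) ln = ([], pb) := by
          simp [pvBlockStep, hln, hpb]
        rw [hX, h0]; exact ih bs pb
      · have hX : pvBlockStep (bs, pb) ln = (bs ++ [pb], []) := by simp [pvBlockStep, hln, hpb]
        have h0 : pvBlockStep (([] : List (List String)), pb) ln = ([pb], []) := by
          simp [pvBlockStep, hln, hpb]
        rw [hX, h0, ih (bs ++ [pb]) [], ih [pb] []]
        simp [List.append_assoc]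
    · have hX : pvBlockStep (bs, pb) ln = (bs, pb ++ [ln]) := by simp [pvBlockStep, hln]
      have h0 : pvBlockStep (([] : List (List String)), pb) ln = ([], pb ++ [ln]) := by
        simp [pvBlockStep, hln]
      rw [hX, h0]; exact ih bs (pb ++ [ln])

-- main bridge: A's fused loop, started from the state reached by packing the pending
-- block pb, equals B's two-phase computation continued with pending block pb
theorem pvMain (lines pb cs buf : List String) (cur : Int)
    (h : pb.foldl pvPackStep ([], [], 0) = (cs, buf, cur)) :
    pvFinA lines (cs, buf, cur) = pvFinB lines ([], pb) := by
  induction lines generalizing pb cs buf cur with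
  | nil =>
    by_cases hpb : pb = []
    · subst hpb
      simp only [List.foldl_nil] at h
      injection h with h1 h2; injection h2 with h2 h3
      subst h1; subst h2; subst h3
      simp [pvFinA, pvFinB]
    · have hbuf : buf ≠ [] := by
        have := pvBufNe pb ([], [], 0) hpb; rw [h] at this; exact this
      simp [pvFinA, pvFinB, hpb, hbuf, pvPackBlock, h]
  | cons ln rest ih =>
    by_cases hln : ln = ""
    · subst hln
      by_cases hpb : pb = []
      · subst hpb
        simp only [List.foldl_nil] at h
        injection h with h1 h2; injection h2 with h2 h3
        subst h1; subst h2; subst h3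
        have hA : pvStepA (([] : List String), ([] : List String), (0 : Int)) "" = ([], [], 0) := by
          simp [pvStepA]
        have hB : pvBlockStep (([] : List (List String)), ([] : List String)) "" = ([], []) := by
          simp [pvBlockStep]
        have stepA : pvFinA ("" :: rest) ([], [], 0) = pvFinA rest ([], [], 0) := by
          simp only [pvFinA, List.foldl_cons, hA]
        have stepB : pvFinB ("" :: rest) ([], []) = pvFinB rest ([], []) := by
          simp only [pvFinB, List.foldl_cons, hB]
        rw [stepA, stepB]; exact ih [] [] [] 0 rfl
      · have hbuf : buf ≠ [] := by
          have := pvBufNe pb ([], [], 0) hpb; rw [h] at this; exact this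
        have hA : pvStepA (cs, buf, cur) "" = (cs ++ [pvFlush buf], [], 0) := by
          simp [pvStepA, hbuf]
        have hB : pvBlockStep (([] : List (List String)), pb) "" = ([pb], []) := by
          simp [pvBlockStep, hpb]
        have stepA : pvFinA ("" :: rest) (cs, buf, cur) = pvFinA rest (cs ++ [pvFlush buf], [], 0) := by
          simp only [pvFinA, List.foldl_cons, hA]
        have stepB : pvFinB ("" :: rest) ([], pb) = pvFinB rest ([pb], []) := by
          simp only [pvFinB, List.foldl_cons, hB]
        have hpack : pvPackBlock pb = cs ++ [pvFlush buf] := by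
          simp [pvPackBlock, h]
        have hacc := pvAccB rest [pb] []
        simp only [List.map_cons, List.map_nil, List.flatten_cons, List.flatten_nil,
          List.append_nil, hpack] at hacc
        have hX := pvAccA rest (cs ++ [pvFlush buf]) [] [] 0
        simp only [List.append_nil] at hX
        rw [stepA, stepB, hX, hacc, ih [] [] [] 0 rfl]
    · have hA : pvStepA (cs, buf, cur) ln = pvPackStep (cs, buf, cur) ln := by
        unfold pvStepA pvPackStep
        dsimp only
        rw [if_neg hln]
      have hB : pvBlockStep (([] : List (List String)), pb) ln = ([], pb ++ [ln]) := by
        simp [pvBlockStep, hln]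
      have hfold : (pb ++ [ln]).foldl pvPackStep ([], [], 0) = pvPackStep (cs, buf, cur) ln := by
        rw [List.foldl_append, h]; simp only [List.foldl_cons, List.foldl_nil]
      have stepA : pvFinA (ln :: rest) (cs, buf, cur) = pvFinA rest (pvPackStep (cs, buf, cur) ln) := by
        simp only [pvFinA, List.foldl_cons, hA]
      have stepB : pvFinB (ln :: rest) ([], pb) = pvFinB rest ([], pb ++ [ln]) := by
        simp only [pvFinB, List.foldl_cons, hB]
      rw [stepA, stepB,
        ← ih (pb ++ [ln]) (pvPackStep (cs, buf, cur) ln).1 (pvPackStep (cs, buf, cur) ln).2.1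
          (pvPackStep (cs, buf, cur) ln).2.2 hfold]

-- the span-building append loop is a map
theorem pvFoldSpans (l : List (Int × String)) (acc : List (List (String × String))) :
    l.foldl (fun spans ic => spans ++ [[("span_id", "S" ++ PySem.Int.toStr ic.1), ("text", ic.2)]]) acc
      = acc ++ l.map (fun ic => [("span_id", "S" ++ PySem.Int.toStr ic.1), ("text", ic.2)]) := by
  induction l generalizing acc with
  | nil => simp
  | cons p ps ih => simp [List.foldl_cons, ih]

-- ===== VERDICT (by name: the statement is the Claim_ definition above) =====
theorem spans_from_text_py_spec : Claim_equal_spans_from_text_py := by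
  intro text _
  unfold Spec_spans_from_text_py spans_from_text_py spans_from_text_py_alt
  dsimp only
  have hc := pvMain ((PySem.Str.splitlines (if text = "" then "" else text)).map PySem.Str.strip) [] [] [] 0 rfl
  simp only [pvFinA, pvFinB] at hc
  rw [hc, pvFoldSpans]
  simp
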